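-- pv_equiv track=rewrite | github.com/AndiRen/groupSort | groupSort.py | sort_buckets
-- ===== SOURCE A (Python) =====
-- def sort_buckets(inner_dict,key,bucket_min,bucket_max,odd):
--     """
--     info here
--     """
--
--     inner_sorted_array=[]
--
--     #Use the bottom-halves range along with their dictionary to sort them
--     for i in range(bucket_min,bucket_max+1):
--         #find each spot in the range attempt to find a matching bottom-half in the dictionary
--         if i in inner_dict:
--             #If dealing with decimal places, add leading zeros as necessary
--             str_val=str(i)
--             if odd==True:
--                 str_val='0'*(len(key)-1-len(str_val))+str_val
--             else:
--                 str_val='0'*(len(key)-len(str_val))+str_val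
--
--             #reattach every bottom-half to its top-half, then add all instances into a sorted array
--             inner_sorted_array+=([int(f"{key}{str_val}")]*inner_dict[i])
--
--     return inner_sorted_array
-- ===== SOURCE B (Python) =====
-- def sort_buckets(inner_dict, key, bucket_min, bucket_max, odd):
--     # Walk the dict's keys in sorted order (rather than every cell of the
--     # bucket range) and zero-pad with str.zfill instead of manual '0'*n.
--     width = len(key) - 1 if odd else len(key)
--     out = []
--     for i in sorted(inner_dict):
--         if bucket_min <= i <= bucket_max:
--             out += [int(key + str(i).zfill(width))] * inner_dict[i]
--     return out
-- ===== Notes on version B (the rewrite author's own statement) =====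
-- stated objective: alternative
-- what changed: B iterates over the sorted dict keys and filters them by the bucket range instead of scanning every integer of range(bucket_min, bucket_max+1) with a membership test, and pads with str.zfill instead of hand-built '0'*n string concatenation; it trades the range scan for a key sort.
-- outside the precondition, e.g. on sort_buckets({1: 2}, '+5', 0, 3, False): A returns [501, 501], B returns [501, 501]
import Mathlib
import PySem

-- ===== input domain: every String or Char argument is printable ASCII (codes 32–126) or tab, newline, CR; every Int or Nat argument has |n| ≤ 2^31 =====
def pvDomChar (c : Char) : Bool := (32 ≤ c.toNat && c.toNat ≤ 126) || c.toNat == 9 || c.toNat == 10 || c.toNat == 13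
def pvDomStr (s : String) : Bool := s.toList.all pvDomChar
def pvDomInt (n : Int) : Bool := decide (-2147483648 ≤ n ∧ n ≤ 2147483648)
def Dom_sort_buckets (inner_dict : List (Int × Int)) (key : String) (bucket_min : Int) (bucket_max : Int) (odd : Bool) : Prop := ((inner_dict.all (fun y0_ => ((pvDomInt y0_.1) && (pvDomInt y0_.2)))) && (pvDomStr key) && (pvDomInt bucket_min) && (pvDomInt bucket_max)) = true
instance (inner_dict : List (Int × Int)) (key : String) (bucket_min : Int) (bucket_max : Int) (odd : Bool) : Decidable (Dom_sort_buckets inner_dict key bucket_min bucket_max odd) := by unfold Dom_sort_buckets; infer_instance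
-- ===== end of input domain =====

-- B iterates over the sorted dict keys (no scan of the whole bucket range) and pads
-- with str.zfill instead of hand-built '0'*n concatenation; return values agree on Pre_.

-- ===== PORT A =====
-- literal transliteration of A: scan range(bucket_min, bucket_max+1), membership test
-- in the dict, manual zero-padding, int(f"{key}{str_val}") via PySem.Int.ofChars?
-- (none = ValueError, excluded by Pre_; the dict lookup is guarded by `contains`).
def sort_buckets (inner_dict : List (Int × Int)) (key : String) (bucket_min : Int) (bucket_max : Int) (odd : Bool) : List Int :=
  (PySem.List.pyRange bucket_min (bucket_max + 1) 1).foldl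
    (fun inner_sorted_array i =>
      if (PySem.Dict.mk inner_dict).contains i then
        let str_val := PySem.Int.toChars i
        let str_val2 :=
          if odd = true then
            List.replicate (PySem.Str.len key - 1 - (str_val.length : Int)).toNat '0' ++ str_val
          else
            List.replicate (PySem.Str.len key - (str_val.length : Int)).toNat '0' ++ str_val
        inner_sorted_array ++
          PySem.List.pyRepeat [(PySem.Int.ofChars? (key.toList ++ str_val2)).getD 0]
            (((PySem.Dict.mk inner_dict).get? i).getD 0)
      else inner_sorted_array) []

-- ===== PORT B =====
-- transliteration of Source B: width computed once, loop over sorted(inner_dict) keys,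
-- in-range test, int(key + str(i).zfill(width)) via PySem.Chars.zfill / ofChars?.
def sort_buckets_alt (inner_dict : List (Int × Int)) (key : String) (bucket_min : Int) (bucket_max : Int) (odd : Bool) : List Int :=
  let width := if odd = true then PySem.Str.len key - 1 else PySem.Str.len key
  (PySem.List.sorted (PySem.Dict.mk inner_dict).keys (fun x => x) false).foldl
    (fun out i =>
      if bucket_min ≤ i ∧ i ≤ bucket_max then
        out ++
          PySem.List.pyRepeat [(PySem.Int.ofChars? (key.toList ++ PySem.Chars.zfill (PySem.Int.toChars i) width)).getD 0]
            (((PySem.Dict.mk inner_dict).get? i).getD 0)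
      else out) []

-- ===== PRECONDITION & SPEC =====
-- Pre_ excludes (i) dict arguments with duplicate keys, which a Python dict cannot have,
-- and (ii) inputs where int(key+…) could raise ValueError once some dict key lies in the
-- bucket range: keys with non-digit characters and negative in-range dict keys (when they
-- still parse, e.g. key='+5', A returns the value B also returns — see the cites).
def Pre_sort_buckets (inner_dict : List (Int × Int)) (key : String) (bucket_min : Int) (bucket_max : Int) (odd : Bool) : Prop :=
  (inner_dict.map Prod.fst).Nodup ∧
  ∀ p ∈ inner_dict, bucket_min ≤ p.1 → p.1 ≤ bucket_max →
    (0 ≤ p.1 ∧ key.toList.all Char.isDigit = true)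
instance (inner_dict : List (Int × Int)) (key : String) (bucket_min : Int) (bucket_max : Int) (odd : Bool) : Decidable (Pre_sort_buckets inner_dict key bucket_min bucket_max odd) := by unfold Pre_sort_buckets; infer_instance

def pvWitness_sort_buckets : (List (Int × Int)) × String × Int × Int × Bool := ([(3, 2), (1, 1)], "42", 0, 9, false)

def Spec_sort_buckets (inner_dict : List (Int × Int)) (key : String) (bucket_min : Int) (bucket_max : Int) (odd : Bool) (out : List Int) : Prop := out = sort_buckets_alt inner_dict key bucket_min bucket_max odd
instance (inner_dict : List (Int × Int)) (key : String) (bucket_min : Int) (bucket_max : Int) (odd : Bool) (out : List Int) : Decidable (Spec_sort_buckets inner_dict key bucket_min bucket_max odd out) := by unfold Spec_sort_buckets; infer_instance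

-- ===== CLAIM (what is proved, stated in full; the proofs are below) =====
def Claim_equal_sort_buckets : Prop := ∀ (inner_dict : List (Int × Int)) (key : String) (bucket_min : Int) (bucket_max : Int) (odd : Bool), Dom_sort_buckets inner_dict key bucket_min bucket_max odd → Pre_sort_buckets inner_dict key bucket_min bucket_max odd → Spec_sort_buckets inner_dict key bucket_min bucket_max odd (sort_buckets inner_dict key bucket_min bucket_max odd)

-- ===== LEMMAS AND PROOFS =====

-- loop shape: 'if p(x): out += g(x)' over a list is flatMap over the filtered list
theorem pv_foldl_ite_append {α β : Type} (p : α → Prop) [DecidablePred p] (g : α → List β) :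
    ∀ (l : List α) (init : List β),
      l.foldl (fun acc x => if p x then acc ++ g x else acc) init
        = init ++ (l.filter (fun x => decide (p x))).flatMap g := by
  intro l
  induction l with
  | nil => intro init; simp
  | cons x xs ih =>
    intro init
    by_cases hx : p x <;>
      simp [List.foldl_cons, hx, ih, List.append_assoc]

theorem pv_flatMap_congr {α β : Type} {l : List α} {f g : α → List β}
    (h : ∀ x ∈ l, f x = g x) : l.flatMap f = l.flatMap g := by
  induction l with
  | nil => rfl
  | cons x xs ih =>
    simp only [List.flatMap_cons, h x (by simp), ih (fun y hy => h y (by simp [hy]))]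

-- two strictly increasing integer lists with the same members are equal
theorem pv_eq_of_pairwise_lt_of_mem_iff {l₁ l₂ : List Int}
    (h₁ : l₁.Pairwise (· < ·)) (h₂ : l₂.Pairwise (· < ·))
    (hm : ∀ x, x ∈ l₁ ↔ x ∈ l₂) : l₁ = l₂ := by
  have hn₁ : l₁.Nodup := h₁.imp ne_of_lt
  have hn₂ : l₂.Nodup := h₂.imp ne_of_lt
  exact List.Perm.eq_of_pairwise
    (fun a b _ _ hab hba => absurd hba (not_lt.mpr hab.le)) h₁ h₂
    ((List.perm_ext_iff_of_nodup hn₁ hn₂).mpr hm)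

-- zfill on str(i) for 0 ≤ i is exactly A's manual left zero-padding
theorem pv_zfill_toChars_nonneg (i : Int) (hi : 0 ≤ i) (w : Int) :
    PySem.Chars.zfill (PySem.Int.toChars i) w
      = List.replicate (w - ((PySem.Int.toChars i).length : Int)).toNat '0' ++ PySem.Int.toChars i := by
  have htc : PySem.Int.toChars i = Nat.toDigits 10 i.toNat := by
    simp [PySem.Int.toChars, not_lt.mpr hi]
  have hlen : 0 < (Nat.toDigits 10 i.toNat).length := Nat.length_toDigits_pos
  cases hds : Nat.toDigits 10 i.toNat with
  | nil => rw [hds] at hlen; simp at hlen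
  | cons c rest =>
    have hc : c.isDigit = true :=
      Nat.isDigit_of_mem_toDigits (by omega) (le_refl 10) (hds ▸ List.mem_cons_self)
    have hcne : ¬ (c = '+' ∨ c = '-') := by
      rintro (rfl | rfl) <;> simp [Char.isDigit] at hc
    rw [htc, hds]
    by_cases hw : w ≤ ((rest.length : Int) + 1)
    · have h0 : (w - ((rest.length : Int) + 1)).toNat = 0 := by omega
      simp [PySem.Chars.zfill, hw, h0]
    · have h1 : w.toNat - (rest.length + 1) = (w - ((rest.length : Int) + 1)).toNat := by omega
      simp [PySem.Chars.zfill, hw, hcne, h1]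

-- the list of buckets A visits equals the list B visits
theorem pv_visit_lists_eq (inner_dict : List (Int × Int)) (bucket_min bucket_max : Int)
    (hnd : (inner_dict.map Prod.fst).Nodup) :
    (PySem.List.pyRange bucket_min (bucket_max + 1) 1).filter
        (fun i => (PySem.Dict.mk inner_dict).contains i)
      = (PySem.List.sorted (PySem.Dict.mk inner_dict).keys (fun x => x) false).filter
          (fun i => decide (bucket_min ≤ i ∧ i ≤ bucket_max)) := by
  have hkeys : (PySem.Dict.mk inner_dict).keys = inner_dict.map Prod.fst := rfl
  apply pv_eq_of_pairwise_lt_of_mem_iff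
  · exact (PySem.List.pairwise_lt_pyRange_one bucket_min (bucket_max + 1)).filter _
  · have hle : (PySem.List.sorted (PySem.Dict.mk inner_dict).keys (fun x => x) false).Pairwise
        (fun a b => a ≤ b) := PySem.List.sorted_pairwise _ _
    have hnds : (PySem.List.sorted (PySem.Dict.mk inner_dict).keys (fun x => x) false).Nodup := by
      refine (PySem.List.sorted_perm _ _ _).nodup_iff.mpr ?_
      rw [hkeys]; exact hnd
    exact ((hle.and hnds).imp (fun h => lt_of_le_of_ne h.1 h.2)).filter _
  · intro x
    simp only [List.mem_filter, PySem.List.mem_pyRange_one, PySem.List.mem_sorted,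
      PySem.Dict.contains, hkeys, List.any_eq_true, decide_eq_true_eq, beq_iff_eq]
    constructor
    · rintro ⟨⟨h1, h2⟩, p, hp, hpx⟩
      exact ⟨hpx ▸ (List.mem_map_of_mem hp : p.1 ∈ _), by omega⟩
    · rintro ⟨hx, h1, h2⟩
      rcases List.mem_map.mp hx with ⟨p, hp, rfl⟩
      exact ⟨⟨by omega, by omega⟩, p, hp, rfl⟩

-- ===== VERDICT (by name: the statement is the Claim_ definition above) =====
theorem sort_buckets_spec : Claim_equal_sort_buckets := by
  intro inner_dict key bucket_min bucket_max odd _hdom hpre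
  obtain ⟨hnd, hall⟩ := hpre
  unfold Spec_sort_buckets sort_buckets sort_buckets_alt
  rw [pv_foldl_ite_append (fun i => (PySem.Dict.mk inner_dict).contains i = true),
      pv_foldl_ite_append (fun i => bucket_min ≤ i ∧ i ≤ bucket_max)]
  simp only [List.nil_append, Bool.decide_eq_true]
  rw [pv_visit_lists_eq inner_dict bucket_min bucket_max hnd]
  apply pv_flatMap_congr
  intro x hx
  -- x is an in-range dict key, hence 0 ≤ x by Pre_
  have hxk : x ∈ inner_dict.map Prod.fst ∧ bucket_min ≤ x ∧ x ≤ bucket_max := by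
    have := List.mem_filter.mp hx
    refine ⟨(PySem.List.mem_sorted _ _ _ _).mp this.1, ?_⟩
    have h2 := this.2
    simp only [decide_eq_true_eq] at h2
    exact h2
  obtain ⟨hxm, hge, hle⟩ := hxk
  rcases List.mem_map.mp hxm with ⟨p, hp, rfl⟩
  have hx0 : (0 : Int) ≤ p.1 := (hall p hp hge hle).1
  cases odd <;>
    simp [pv_zfill_toChars_nonneg p.1 hx0, PySem.Str.len]
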